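-- pv_equiv track=rewrite | github.com/pypi-data/pypi-mirror-390 | packages/blue-platform/blue_platform-1.0.tar.gz/blue_platform-1.0/src/blue/operators/semantic_transform_operator.py | _calculate_distinct_required_values_with_merged_fields_cost
-- ===== SOURCE A (Python) =====
-- from typing import List, Dict, Any, Callable, Optional
--
-- def _calculate_distinct_required_values_with_merged_fields_cost(field_dependencies: Dict[str, set], data_group: List[Dict[str, Any]]) -> int:
--     """Calculate cost for merged distinct optimization strategy: groups fields with shared source dependencies."""
--     # Use the same optimal merging algorithm as the execution function
--     field_groups = _get_merged_field_groups(field_dependencies)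
--
--     # Calculate cost for each merged group
--     total_cost = 0
--     for group in field_groups:
--         source_fields = group['source_fields']
--
--         # Get distinct value combinations for these source fields
--         distinct_combinations = set()
--         for record in data_group:
--             combination = tuple(record.get(field, '') for field in source_fields)
--             distinct_combinations.add(combination)
--
--         total_cost += len(distinct_combinations)
--
--     return total_cost
--
-- def _get_merged_field_groups(field_dependencies: Dict[str, set]) -> List[Dict[str, Any]]:
--     """Get merged field groups using optimal merging algorithm for shared source dependencies."""
--     # Create initial groups by exact source field combinations
--     source_combinations = {}
--     for field_name, source_fields in field_dependencies.items():
--         key = tuple(sorted(source_fields))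
--         if key not in source_combinations:
--             source_combinations[key] = []
--         source_combinations[key].append(field_name)
--
--     # Merge groups that can be processed together
--     # A group can be merged with another if all its source fields are a subset of the other's source fields
--     merged_groups = []
--     processed_combinations = set()
--
--     # Sort combinations by size (largest first) to ensure we process supersets first
--     sorted_combinations = sorted(source_combinations.items(), key=lambda x: len(x[0]), reverse=True)
--
--     for source_fields, field_names in sorted_combinations:
--         if source_fields in processed_combinations:
--             continue
--
--         # Find all combinations that can be merged with this one
--         mergeable_combinations = [source_fields]
--         mergeable_fields = field_names.copy()
--
--         for other_source_fields, other_field_names in source_combinations.items():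
--             if other_source_fields in processed_combinations:
--                 continue
--             if other_source_fields == source_fields:
--                 continue
--
--             # Check if other_source_fields is a subset of source_fields
--             if set(other_source_fields).issubset(set(source_fields)):
--                 mergeable_combinations.append(other_source_fields)
--                 mergeable_fields.extend(other_field_names)
--                 processed_combinations.add(other_source_fields)
--
--         # Create merged group
--         merged_groups.append({'source_fields': list(source_fields), 'target_fields': mergeable_fields})
--         processed_combinations.add(source_fields)
--
--     return merged_groups
-- ===== SOURCE B (Python) =====
-- def _calculate_distinct_required_values_with_merged_fields_cost(field_dependencies, data_group):
--     # distinct sorted source-field keys, first occurrence order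
--     keys = list(dict.fromkeys(tuple(sorted(v)) for v in field_dependencies.values()))
--     # inverted index: field name -> set of keys containing that field
--     containing = {}
--     for k in keys:
--         for f in k:
--             containing.setdefault(f, set()).add(k)
--     # k is maximal iff the only key containing every field of k is k itself;
--     # candidates = intersection of the index sets (all keys, for the empty key)
--     maximal = []
--     for k in keys:
--         cand = set(keys)
--         for f in k:
--             cand &= containing[f]
--         if len(cand) == 1:
--             maximal.append(k)
--     # one global set of (group-index, projected combination) pairs, one pass over records
--     seen = set()
--     for record in data_group:
--         for i, k in enumerate(maximal):
--             seen.add((i, tuple(record.get(f, '') for f in k)))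
--     return len(seen)
-- ===== Notes on version B (the rewrite author's own statement) =====
-- stated objective: alternative
-- what changed: B replaces A's subset-merging loop over group pairs by an inverted index from field name to the set of keys containing it (a key is maximal iff the intersection of its fields' index sets is a singleton), and replaces A's per-group distinct sets accumulated in separate record scans by one global set of (group-index, value-combination) pairs filled in a single pass over the records.
import Mathlib
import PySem

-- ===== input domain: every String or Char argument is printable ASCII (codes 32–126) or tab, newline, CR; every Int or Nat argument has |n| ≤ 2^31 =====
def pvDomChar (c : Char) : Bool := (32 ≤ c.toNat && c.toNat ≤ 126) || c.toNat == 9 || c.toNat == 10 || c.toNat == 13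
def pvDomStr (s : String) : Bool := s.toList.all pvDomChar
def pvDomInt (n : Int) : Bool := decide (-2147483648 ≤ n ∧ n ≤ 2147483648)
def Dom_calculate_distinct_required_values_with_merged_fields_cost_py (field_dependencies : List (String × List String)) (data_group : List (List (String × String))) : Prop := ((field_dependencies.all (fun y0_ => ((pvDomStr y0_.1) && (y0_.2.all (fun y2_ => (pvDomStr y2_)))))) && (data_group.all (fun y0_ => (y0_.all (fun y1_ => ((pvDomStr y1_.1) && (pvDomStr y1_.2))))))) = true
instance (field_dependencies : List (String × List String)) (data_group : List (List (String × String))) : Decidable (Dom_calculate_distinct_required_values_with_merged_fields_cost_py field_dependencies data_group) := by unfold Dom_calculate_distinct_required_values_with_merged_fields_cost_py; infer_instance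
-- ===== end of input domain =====

-- B replaces A's subset-merging loop by an inverted index (field -> keys containing it,
-- a key is kept iff the intersection of its fields' index sets is a singleton) and replaces
-- A's per-group distinct sets by ONE set of (group-index, combination) pairs filled in a
-- single pass over the records (objective: alternative).

-- ===== PORT A =====
-- tuple(sorted(source_fields)) where source_fields is a Python set
def pvSortedKey (v : List String) : List String :=
  PySem.List.sorted (PySem.Set.ofList v) (fun x => x)

-- body of A's inner 'for other_source_fields, other_field_names in source_combinations.items()'
-- state: (mergeable_combinations, mergeable_fields, processed)
def pvInnerF (p : List String × List String)
    (st2 : List (List String) × List String × PySem.Set (List String))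
    (q : List String × List String) :
    List (List String) × List String × PySem.Set (List String) :=
  if st2.2.2.contains q.1 then st2
  else if q.1 = p.1 then st2
  else if PySem.Set.issubset (PySem.Set.ofList q.1) (PySem.Set.ofList p.1) then
    (st2.1 ++ [q.1], st2.2.1 ++ q.2, st2.2.2.add q.1)
  else st2

def pvMergeInner (items : List (List String × List String))
    (p : List String × List String) (P : PySem.Set (List String)) :
    List (List String) × List String × PySem.Set (List String) :=
  items.foldl (pvInnerF p) ([p.1], p.2, P)

-- body of A's outer loop over sorted_combinations; state: (merged_groups, processed);
-- a group dict {'source_fields': …, 'target_fields': …} is ported as a pair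
def pvMergeStep (items : List (List String × List String))
    (st : List (List String × List String) × PySem.Set (List String))
    (p : List String × List String) :
    List (List String × List String) × PySem.Set (List String) :=
  if st.2.contains p.1 then st
  else
    let inner := pvMergeInner items p st.2
    (st.1 ++ [(p.1, inner.2.1)], inner.2.2.add p.1)

def pvGetMergedFieldGroups (field_dependencies : List (String × List String)) :
    List (List String × List String) :=
  let d := PySem.Dict.ofList field_dependencies
  let sc : PySem.Dict (List String) (List String) :=
    d.items.foldl
      (fun sc p => sc.insert (pvSortedKey p.2) (sc.getD (pvSortedKey p.2) [] ++ [p.1]))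
      PySem.Dict.empty
  let sortedCombos := PySem.List.sorted sc.items (fun p => p.1.length) true
  (sortedCombos.foldl (pvMergeStep sc.items) ([], PySem.Set.empty)).1

def calculate_distinct_required_values_with_merged_fields_cost_py (field_dependencies : List (String × List String)) (data_group : List (List (String × String))) : Int :=
  (pvGetMergedFieldGroups field_dependencies).foldl
    (fun total group =>
      total + PySem.Set.len
        (data_group.foldl
          (fun s record =>
            s.add (group.1.map (fun f => (PySem.Dict.ofList record).getD f "")))
          PySem.Set.empty))
    0

-- ===== PORT B =====
-- inverted index: field name -> set of keys containing it ('containing.setdefault(f, set()).add(k)')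
def pvContaining (keys : List (List String)) : PySem.Dict String (PySem.Set (List String)) :=
  keys.foldl
    (fun d k => k.foldl
      (fun d f => d.insert f ((d.getD f PySem.Set.empty).add k)) d)
    PySem.Dict.empty

-- 'cand = set(keys); for f in k: cand &= containing[f]'
-- (containing[f] always exists for f ∈ k ∈ keys, so getD with an empty default is exact there)
def pvCand (containing : PySem.Dict String (PySem.Set (List String)))
    (keys : List (List String)) (k : List String) : PySem.Set (List String) :=
  k.foldl (fun c f => PySem.Set.inter c (containing.getD f PySem.Set.empty))
    (PySem.Set.ofList keys)

def calculate_distinct_required_values_with_merged_fields_cost_py_alt (field_dependencies : List (String × List String)) (data_group : List (List (String × String))) : Int :=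
  let keys := PySem.List.dedup (((PySem.Dict.ofList field_dependencies).values).map pvSortedKey)
  let containing := pvContaining keys
  let maximal := keys.filter (fun k => PySem.Set.len (pvCand containing keys k) == 1)
  PySem.Set.len
    (data_group.foldl
      (fun seen record =>
        (PySem.List.enumerate maximal).foldl
          (fun seen ik =>
            PySem.Set.add seen (ik.1, ik.2.map (fun f => (PySem.Dict.ofList record).getD f "")))
          seen)
      PySem.Set.empty)

-- ===== PRECONDITION & SPEC =====
def Spec_calculate_distinct_required_values_with_merged_fields_cost_py (field_dependencies : List (String × List String)) (data_group : List (List (String × String))) (out : Int) : Prop := out = calculate_distinct_required_values_with_merged_fields_cost_py_alt field_dependencies data_group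
instance (field_dependencies : List (String × List String)) (data_group : List (List (String × String))) (out : Int) : Decidable (Spec_calculate_distinct_required_values_with_merged_fields_cost_py field_dependencies data_group out) := by unfold Spec_calculate_distinct_required_values_with_merged_fields_cost_py; infer_instance

-- ===== CLAIM (what is proved, stated in full; the proofs are below) =====
def Claim_equal_calculate_distinct_required_values_with_merged_fields_cost_py : Prop := ∀ (field_dependencies : List (String × List String)) (data_group : List (List (String × String))), Dom_calculate_distinct_required_values_with_merged_fields_cost_py field_dependencies data_group → Spec_calculate_distinct_required_values_with_merged_fields_cost_py field_dependencies data_group (calculate_distinct_required_values_with_merged_fields_cost_py field_dependencies data_group)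


-- ===== LEMMAS AND PROOFS =====

-- set-inclusion of keys, as a Prop
def pvSub (k o : List String) : Prop := ∀ x ∈ k, x ∈ o

-- "k is a maximal key": no other key of ks properly contains it
def pvMaxP (ks : List (List String)) (k : List String) : Prop :=
  ∀ o ∈ ks, k ≠ o → ¬ pvSub k o

-- A's maximality test, as used in the characterisation of its merging loop
def pvMaxB (ks : List (List String)) (k : List String) : Bool :=
  !(ks.any (fun o => decide (k.length < o.length)
      && PySem.Set.issubset (PySem.Set.ofList k) (PySem.Set.ofList o)))

lemma pvSubB_iff (k o : List String) :
    PySem.Set.issubset (PySem.Set.ofList k) (PySem.Set.ofList o) = true ↔ pvSub k o := by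
  simp [PySem.Set.issubset_iff, PySem.Set.mem_ofList, pvSub]

-- a proper subset key is strictly shorter (keys are strictly sorted, hence duplicate-free)
lemma pvSub_len_lt (k o : List String) (hk : k.Pairwise (· < ·)) (ho : o.Pairwise (· < ·))
    (hs : pvSub k o) (hne : k ≠ o) : k.length < o.length := by
  have hkn : k.Nodup := hk.imp (fun h => ne_of_lt h)
  have hon : o.Nodup := ho.imp (fun h => ne_of_lt h)
  have hsub : k.toFinset ⊆ o.toFinset := by
    intro x hx; simp only [List.mem_toFinset] at *; exact hs x hx
  have hcard : k.toFinset.card ≤ o.toFinset.card := Finset.card_le_card hsub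
  rw [List.toFinset_card_of_nodup hkn, List.toFinset_card_of_nodup hon] at hcard
  rcases lt_or_eq_of_le hcard with h | h
  · exact h
  · exfalso; apply hne
    have hperm : k.Perm o := by
      apply (List.perm_ext_iff_of_nodup hkn hon).mpr
      intro x
      have : k.toFinset = o.toFinset := Finset.eq_of_subset_of_card_le hsub (by
        rw [List.toFinset_card_of_nodup hkn, List.toFinset_card_of_nodup hon]; omega)
      constructor
      · exact fun hx => hs x hx
      · intro hx
        have : x ∈ k.toFinset := by rw [this]; simpa using hx
        simpa using this
    have h1 : PySem.List.sorted o (fun x => x) false = k :=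
      PySem.List.sorted_eq_of_perm_of_pairwise_lt o k (fun x => x) hperm hk
    have h2 : PySem.List.sorted o (fun x => x) false = o :=
      PySem.List.sorted_eq_of_perm_of_pairwise_lt o o (fun x => x) (List.Perm.refl o) ho
    rw [← h1, h2]

-- A's length guard is equivalent to 'k != o' on the strictly sorted keys
lemma pvMaxB_iff (ks : List (List String)) (k : List String)
    (hk : k.Pairwise (· < ·)) (helem : ∀ o ∈ ks, o.Pairwise (· < ·)) :
    pvMaxB ks k = true ↔ pvMaxP ks k := by
  simp only [pvMaxB, pvMaxP, Bool.not_eq_eq_eq_not, Bool.not_true, List.any_eq_false,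
    Bool.and_eq_true, not_and, decide_eq_true_eq, pvSubB_iff]
  constructor
  · intro h o ho hne hsub
    exact h o ho (pvSub_len_lt k o hk (helem o ho) hsub hne) hsub
  · intro h o ho hlen hsub
    exact h o ho (fun he => by subst he; omega) hsub

-- every key has a maximal key above it
lemma pvExists_max (ks : List (List String)) (helem : ∀ k ∈ ks, k.Pairwise (· < ·)) :
    ∀ k ∈ ks, ∃ o ∈ ks, pvSub k o ∧ pvMaxP ks o := by
  classical
  intro k hk
  set S := ks.filter (fun o => decide (pvSub k o)) with hSdef
  have hkS : k ∈ S := by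
    simp [hSdef, List.mem_filter, hk, pvSub]
  have hne : S ≠ [] := fun h => by simp [h] at hkS
  obtain ⟨o, ho⟩ : ∃ o, o ∈ S.argmax List.length := by
    cases h : S.argmax List.length with
    | none => exact absurd (List.argmax_eq_none.mp h) hne
    | some m => exact ⟨m, by simp⟩
  have hoS : o ∈ S := List.argmax_mem ho
  have hoks : o ∈ ks := (List.mem_filter.mp hoS).1
  have hosub : pvSub k o := by
    have := (List.mem_filter.mp hoS).2; simpa using this
  refine ⟨o, hoks, hosub, ?_⟩
  intro o' ho' hneq hsub
  have ho'S : o' ∈ S := by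
    simp only [hSdef, List.mem_filter]
    exact ⟨ho', by simp [pvSub]; intro x hx; exact hsub x (hosub x hx)⟩
  have hle : o'.length ≤ o.length := List.le_of_mem_argmax ho'S ho
  have hlt : o.length < o'.length :=
    pvSub_len_lt o o' (helem o hoks) (helem o' ho') hsub hneq
  omega

-- membership in the processed set after A's inner merging loop
lemma pvInner_mem (p : List String × List String) (qs : List (List String × List String)) :
    ∀ (st2 : List (List String) × List String × PySem.Set (List String)) (k : List String),
      (k ∈ (qs.foldl (pvInnerF p) st2).2.2 ↔
        k ∈ st2.2.2 ∨ ∃ q ∈ qs, k = q.1 ∧ q.1 ≠ p.1 ∧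
          PySem.Set.issubset (PySem.Set.ofList q.1) (PySem.Set.ofList p.1) = true) := by
  induction qs with
  | nil => intro st2 k; simp
  | cons q qs ih =>
    intro st2 k
    rw [List.foldl_cons, ih]
    unfold pvInnerF
    split_ifs with h1 h2 h3
    · rw [PySem.Set.contains_iff] at h1
      constructor
      · rintro (h | h); · exact Or.inl h
        · exact Or.inr ⟨h.choose, List.mem_cons_of_mem _ h.choose_spec.1, h.choose_spec.2⟩
      · rintro (h | ⟨q', hq', hk, hne, hsub⟩); · exact Or.inl h
        · rcases List.mem_cons.mp hq' with rfl | hmem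
          · by_cases hkq : k ∈ st2.2.2
            · exact Or.inl hkq
            · subst hk; exact Or.inl h1
          · exact Or.inr ⟨q', hmem, hk, hne, hsub⟩
    · constructor
      · rintro (h | ⟨q', hq', rest⟩); · exact Or.inl h
        · exact Or.inr ⟨q', List.mem_cons_of_mem _ hq', rest⟩
      · rintro (h | ⟨q', hq', hk, hne, hsub⟩); · exact Or.inl h
        · rcases List.mem_cons.mp hq' with rfl | hmem
          · exact absurd h2 hne
          · exact Or.inr ⟨q', hmem, hk, hne, hsub⟩
    · simp only [PySem.Set.mem_add]
      constructor
      · rintro ((h | rfl) | ⟨q', hq', rest⟩)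
        · exact Or.inl h
        · exact Or.inr ⟨q, List.mem_cons_self .., ⟨rfl, h2, h3⟩⟩
        · exact Or.inr ⟨q', List.mem_cons_of_mem _ hq', rest⟩
      · rintro (h | ⟨q', hq', hk, hne, hsub⟩)
        · exact Or.inl (Or.inl h)
        · rcases List.mem_cons.mp hq' with rfl | hmem
          · exact Or.inl (Or.inr hk)
          · exact Or.inr ⟨q', hmem, hk, hne, hsub⟩
    · constructor
      · rintro (h | ⟨q', hq', rest⟩); · exact Or.inl h
        · exact Or.inr ⟨q', List.mem_cons_of_mem _ hq', rest⟩
      · rintro (h | ⟨q', hq', hk, hne, hsub⟩); · exact Or.inl h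
        · rcases List.mem_cons.mp hq' with rfl | hmem
          · exact absurd hsub h3
          · exact Or.inr ⟨q', hmem, hk, hne, hsub⟩

-- mapping commutes with PySem's insertion sort when the key factors through the map
lemma pvMap_insertBy {α β : Type} (f : α → β) (bf : β → β → Bool) (x : α) (ys : List α) :
    (PySem.List.insertBy (fun a b => bf (f a) (f b)) x ys).map f
      = PySem.List.insertBy bf (f x) (ys.map f) := by
  induction ys with
  | nil => simp [PySem.List.insertBy]
  | cons y ys ih =>
    simp only [PySem.List.insertBy, List.map_cons]
    by_cases h : bf (f x) (f y)
    · simp [h]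
    · simp [h, ih]

lemma pvSorted_map_key {α β κ : Type} [LT κ] [DecidableLT κ] (f : α → β) (key : β → κ)
    (xs : List α) :
    (PySem.List.sorted xs (fun a => key (f a)) true).map f
      = PySem.List.sorted (xs.map f) key true := by
  rw [PySem.List.sorted_rev_eq_foldl_insertBy, PySem.List.sorted_rev_eq_foldl_insertBy]
  suffices h : ∀ acc : List α,
      (xs.foldl (fun acc x => PySem.List.insertBy (fun a b => decide (key (f b) < key (f a))) x acc) acc).map f
        = (xs.map f).foldl (fun acc x => PySem.List.insertBy (fun a b => decide (key b < key a)) x acc) (acc.map f) by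
    simpa using h []
  induction xs with
  | nil => intro acc; simp
  | cons x xs ih =>
    intro acc
    simp only [List.foldl_cons, List.map_cons]
    rw [ih, pvMap_insertBy f (fun a b => decide (key b < key a)) x acc]

-- A's merging loop keeps exactly the maximal keys, in order
lemma pvMerge_go
    (items all : List (List String × List String))
    (hksmem : ∀ x, x ∈ all.map Prod.fst ↔ x ∈ items.map Prod.fst)
    (helem : ∀ k ∈ all.map Prod.fst, List.Pairwise (· < ·) k)
    (hnd : (all.map Prod.fst).Nodup)
    (hpw : List.Pairwise (fun a b => b.1.length ≤ a.1.length) all) :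
    ∀ (suf pre : List (List String × List String)), all = pre ++ suf →
    ∀ (gs : List (List String × List String)) (P : PySem.Set (List String)),
      (∀ k ∈ all.map Prod.fst,
        (k ∈ P ↔ ∃ o ∈ pre.map Prod.fst, pvMaxP (all.map Prod.fst) o ∧ pvSub k o)) →
      (suf.foldl (pvMergeStep items) (gs, P)).1.map Prod.fst
        = gs.map Prod.fst ++ (suf.map Prod.fst).filter (pvMaxB (all.map Prod.fst)) := by
  intro suf
  induction suf with
  | nil => intro pre hall gs P hP; simp
  | cons p suf' ih =>
    intro pre hall gs P hP
    have hm : p.1 ∈ all.map Prod.fst := by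
      rw [hall]; simp
    have hmpre : p.1 ∉ pre.map Prod.fst := by
      intro hmem
      have := hnd
      rw [hall, List.map_append] at this
      rcases (List.nodup_append.mp this) with ⟨_, _, hdisj⟩
      exact hdisj _ hmem _ (by simp) rfl
    rw [List.foldl_cons]
    by_cases hPm : p.1 ∈ P
    -- skipped: p.1 already processed, hence not maximal
    · obtain ⟨o, hopre, hoMax, hosub⟩ := (hP p.1 hm).mp hPm
      have hnotmax : ¬ pvMaxP (all.map Prod.fst) p.1 := by
        intro hmax
        have hneq : p.1 ≠ o := fun h => hmpre (h ▸ hopre)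
        have hoall : o ∈ all.map Prod.fst := by
          rw [hall, List.map_append]; exact List.mem_append_left _ hopre
        exact hmax o hoall hneq hosub
      have hstep : pvMergeStep items (gs, P) p = (gs, P) := by
        unfold pvMergeStep
        rw [if_pos (by rwa [PySem.Set.contains_iff])]
      rw [hstep, ih (pre ++ [p]) (by simpa using hall) gs P ?_]
      · have hfalse : pvMaxB (all.map Prod.fst) p.1 = false := by
          rcases Bool.eq_false_or_eq_true (pvMaxB (all.map Prod.fst) p.1) with h | h
          · exact absurd ((pvMaxB_iff _ _ (helem _ hm) (fun o ho => helem o ho)).mp h) hnotmax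
          · exact h
        simp [hfalse]
      · intro k hk
        rw [hP k hk]
        constructor
        · rintro ⟨o', h1, h2, h3⟩
          exact ⟨o', by simp only [List.map_append]; exact List.mem_append_left _ h1, h2, h3⟩
        · rintro ⟨o', h1, h2, h3⟩
          simp only [List.map_append, List.mem_append] at h1
          rcases h1 with h1 | h1
          · exact ⟨o', h1, h2, h3⟩
          · exfalso
            have : o' = p.1 := by simpa using h1
            subst this
            exact hnotmax h2
    -- emitted: p.1 is maximal
    · have hmax : pvMaxP (all.map Prod.fst) p.1 := by
        obtain ⟨o, hoall, hsub, hoMax⟩ := pvExists_max (all.map Prod.fst) helem p.1 hm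
        by_cases heq : o = p.1
        · exact heq ▸ hoMax
        · exfalso
          have hlen : p.1.length < o.length :=
            pvSub_len_lt _ _ (helem _ hm) (helem _ hoall) hsub (fun h => heq h.symm)
          -- o must lie in pre
          have hopre : o ∈ pre.map Prod.fst := by
            rw [hall, List.map_append] at hoall
            rcases List.mem_append.mp hoall with h | h
            · exact h
            · exfalso
              simp only [List.map_cons, List.mem_cons] at h
              rcases h with h | h
              · exact heq h
              · -- o after p in the sorted list: its length is ≤ p.1.length
                have hpw2 : List.Pairwise (fun a b => b.1.length ≤ a.1.length) (p :: suf') := by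
                  rw [hall] at hpw
                  exact (List.pairwise_append.mp hpw).2.1
                obtain ⟨q, hq, rfl⟩ := List.mem_map.mp h
                have := (List.pairwise_cons.mp hpw2).1 q hq
                omega
          exact hPm ((hP p.1 hm).mpr ⟨o, hopre, hoMax, hsub⟩)
      have hstep : pvMergeStep items (gs, P) p
          = (gs ++ [(p.1, (pvMergeInner items p P).2.1)], (pvMergeInner items p P).2.2.add p.1) := by
        unfold pvMergeStep
        rw [if_neg (by rw [PySem.Set.contains_iff]; exact hPm)]
      rw [hstep, ih (pre ++ [p]) (by simpa using hall) _ _ ?_]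
      · have htrue : pvMaxB (all.map Prod.fst) p.1 = true := (pvMaxB_iff _ _ (helem _ hm) (fun o ho => helem o ho)).mpr hmax
        simp [htrue]
      · intro k hk
        rw [PySem.Set.mem_add, pvMergeInner, pvInner_mem p items ([p.1], p.2, P) k]
        constructor
        · rintro ((h | ⟨q, hq, rfl, hne, hsub⟩) | rfl)
          · obtain ⟨o', h1, h2, h3⟩ := (hP k hk).mp h
            exact ⟨o', by simp only [List.map_append]; exact List.mem_append_left _ h1, h2, h3⟩
          · exact ⟨p.1, by simp [List.map_append], hmax, (pvSubB_iff _ _).mp hsub⟩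
          · exact ⟨p.1, by simp [List.map_append], hmax, fun x hx => hx⟩
        · rintro ⟨o', h1, h2, h3⟩
          simp only [List.map_append, List.mem_append, List.map_cons, List.mem_cons] at h1
          rcases h1 with h1 | h1
          · exact Or.inl (Or.inl ((hP k hk).mpr ⟨o', h1, h2, h3⟩))
          · have ho' : o' = p.1 := by simpa using h1
            subst ho'
            by_cases hkp : k = p.1
            · exact Or.inr hkp
            · have hkitems : k ∈ items.map Prod.fst := (hksmem k).mp hk
              obtain ⟨q, hq, rfl⟩ := List.mem_map.mp hkitems
              exact Or.inl (Or.inr ⟨q, hq, rfl, hkp, (pvSubB_iff _ _).mpr h3⟩)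

-- the distinct keys, first occurrences in order
def pvK (fd : List (String × List String)) : List (List String) :=
  PySem.Set.ofList (((PySem.Dict.ofList fd).items).map (fun p => pvSortedKey p.2))

def pvKS (fd : List (String × List String)) : List (List String) :=
  PySem.List.sorted (pvK fd) (fun k => k.length) true

-- A's grouping dict has the distinct keys, in first-occurrence order
lemma pvSc_keys (fd : List (String × List String)) :
    ((PySem.Dict.ofList fd).items.foldl
      (fun sc p => sc.insert (pvSortedKey p.2) (sc.getD (pvSortedKey p.2) [] ++ [p.1]))
      PySem.Dict.empty).keys = pvK fd := by
  rw [PySem.Dict.keys_foldl_insert_key ((PySem.Dict.ofList fd).items) (fun p => pvSortedKey p.2)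
      (fun sc p => sc.getD (pvSortedKey p.2) [] ++ [p.1]) PySem.Dict.empty]
  simp [pvK, PySem.Dict.keys_empty, PySem.Set.update_nil_left]

-- the groups produced by A carry exactly the maximal keys, in order
lemma pvGroups_fst (fd : List (String × List String)) :
    (pvGetMergedFieldGroups fd).map Prod.fst = (pvKS fd).filter (pvMaxB (pvKS fd)) := by
  unfold pvGetMergedFieldGroups
  set sc := (PySem.Dict.ofList fd).items.foldl
      (fun sc p => sc.insert (pvSortedKey p.2) (sc.getD (pvSortedKey p.2) [] ++ [p.1]))
      PySem.Dict.empty with hsc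
  set L := PySem.List.sorted sc.items (fun p => p.1.length) true with hL
  have hkeys : sc.items.map Prod.fst = pvK fd := by
    rw [hsc]; exact pvSc_keys fd
  have hmap : L.map Prod.fst = pvKS fd := by
    rw [hL, pvSorted_map_key Prod.fst (fun k => k.length) sc.items, hkeys, pvKS]
  have hperm : (L.map Prod.fst).Perm (sc.items.map Prod.fst) :=
    (PySem.List.sorted_perm sc.items (fun p => p.1.length) true).map Prod.fst
  have hmain := pvMerge_go sc.items L
    (fun x => hperm.mem_iff)
    (by
      rw [hmap]
      intro k hk
      have hk' : k ∈ pvK fd := (PySem.List.mem_sorted _ _ _ k).mp hk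
      rw [pvK, PySem.Set.mem_ofList] at hk'
      obtain ⟨p, hp, rfl⟩ := List.mem_map.mp hk'
      exact PySem.List.sorted_ofList_pairwise_lt p.2)
    (by
      rw [hmap, pvKS]
      exact ((PySem.List.sorted_perm (pvK fd) (fun k => k.length) true).nodup_iff).mpr
        (PySem.Set.nodup_ofList _))
    (PySem.List.sorted_pairwise_rev sc.items (fun p => p.1.length))
    L [] rfl [] PySem.Set.empty
    (by intro k hk; simp [PySem.Set.empty])
  rw [hmain, hmap]
  simp

-- ========== B-side lemmas ==========

-- the set stored under f after the inner loop over k's fields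
lemma pvInnerIdx_getD (k : List String) (fs : List String) :
    ∀ (d : PySem.Dict String (PySem.Set (List String))) (f : String) (o : List String),
      (o ∈ (fs.foldl (fun d f => d.insert f ((d.getD f PySem.Set.empty).add k)) d).getD f PySem.Set.empty
        ↔ o ∈ d.getD f PySem.Set.empty ∨ (o = k ∧ f ∈ fs)) := by
  induction fs with
  | nil => intro d f o; simp
  | cons f' fs ih =>
    intro d f o
    rw [List.foldl_cons, ih]
    rw [PySem.Dict.getD_insert]
    by_cases hf : f = f'
    · subst hf
      simp [PySem.Set.mem_add]
      tauto
    · simp [hf]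

-- membership in the inverted index
lemma pvContaining_getD (ks : List (List String)) :
    ∀ (f : String) (o : List String),
      (o ∈ (pvContaining ks).getD f PySem.Set.empty ↔ o ∈ ks ∧ f ∈ o) := by
  unfold pvContaining
  suffices h : ∀ (ks : List (List String)) (d : PySem.Dict String (PySem.Set (List String))) (f : String) (o : List String),
      (o ∈ (ks.foldl (fun d k => k.foldl (fun d f => d.insert f ((d.getD f PySem.Set.empty).add k)) d) d).getD f PySem.Set.empty
        ↔ o ∈ d.getD f PySem.Set.empty ∨ (o ∈ ks ∧ f ∈ o)) by
    intro f o
    rw [h ks PySem.Dict.empty f o]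
    simp [PySem.Dict.getD_empty, PySem.Set.empty]
  intro ks
  induction ks with
  | nil => intro d f o; simp
  | cons k ks ih =>
    intro d f o
    rw [List.foldl_cons, ih, pvInnerIdx_getD]
    constructor
    · rintro ((h | ⟨rfl, hf⟩) | ⟨hks, hf⟩)
      · exact Or.inl h
      · exact Or.inr ⟨List.mem_cons_self .., hf⟩
      · exact Or.inr ⟨List.mem_cons_of_mem _ hks, hf⟩
    · rintro (h | ⟨hks, hf⟩)
      · exact Or.inl (Or.inl h)
      · rcases List.mem_cons.mp hks with rfl | hks'
        · exact Or.inl (Or.inr ⟨rfl, hf⟩)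
        · exact Or.inr ⟨hks', hf⟩

-- membership in the candidate intersection
lemma pvCand_mem (ks : List (List String)) (k o : List String) :
    o ∈ pvCand (pvContaining ks) ks k ↔ o ∈ ks ∧ pvSub k o := by
  unfold pvCand
  suffices h : ∀ (fs : List String) (c : PySem.Set (List String)),
      (o ∈ fs.foldl (fun c f => PySem.Set.inter c ((pvContaining ks).getD f PySem.Set.empty)) c
        ↔ o ∈ c ∧ ∀ f ∈ fs, o ∈ ks ∧ f ∈ o) by
    rw [h k (PySem.Set.ofList ks)]
    rw [PySem.Set.mem_ofList]
    unfold pvSub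
    constructor
    · rintro ⟨h1, h2⟩; exact ⟨h1, fun f hf => (h2 f hf).2⟩
    · rintro ⟨h1, h2⟩; exact ⟨h1, fun f hf => ⟨h1, h2 f hf⟩⟩
  intro fs
  induction fs with
  | nil => intro c; simp
  | cons f fs ih =>
    intro c
    rw [List.foldl_cons, ih, PySem.Set.mem_inter, pvContaining_getD]
    constructor
    · rintro ⟨⟨hc, hk⟩, hrest⟩
      exact ⟨hc, fun f' hf' => by rcases List.mem_cons.mp hf' with rfl | h; exact hk; exact hrest f' h⟩
    · rintro ⟨hc, hall⟩
      exact ⟨⟨hc, hall f (List.mem_cons_self ..)⟩, fun f' hf' => hall f' (List.mem_cons_of_mem _ hf')⟩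

-- the candidate intersection is duplicate-free
lemma pvCand_nodup (containing : PySem.Dict String (PySem.Set (List String)))
    (ks : List (List String)) (k : List String) :
    (pvCand containing ks k).Nodup := by
  unfold pvCand
  suffices h : ∀ (fs : List String) (c : PySem.Set (List String)), c.Nodup →
      (fs.foldl (fun c f => PySem.Set.inter c (containing.getD f PySem.Set.empty)) c).Nodup by
    exact h k _ (PySem.Set.nodup_ofList ks)
  intro fs
  induction fs with
  | nil => intro c hc; exact hc
  | cons f fs ih => intro c hc; exact ih _ (PySem.Set.nodup_inter _ _ hc)

-- B's singleton-intersection test agrees with maximality, on the distinct keys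
lemma pvCand_len_iff (fd : List (String × List String)) (k : List String)
    (hk : k ∈ pvK fd) :
    ((PySem.Set.len (pvCand (pvContaining (pvK fd)) (pvK fd) k) == 1) = true)
      ↔ pvMaxP (pvK fd) k := by
  have hmem := pvCand_mem (pvK fd) k
  have hknd := pvCand_nodup (pvContaining (pvK fd)) (pvK fd) k
  have hself : k ∈ pvCand (pvContaining (pvK fd)) (pvK fd) k :=
    (hmem k).mpr ⟨hk, fun x hx => hx⟩
  have hlen : PySem.Set.len (pvCand (pvContaining (pvK fd)) (pvK fd) k)
      = ((pvCand (pvContaining (pvK fd)) (pvK fd) k).length : Int) := rfl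
  rw [beq_iff_eq, hlen]
  set c := pvCand (pvContaining (pvK fd)) (pvK fd) k with hc
  constructor
  · intro h1 o ho hne hsub
    have hlen1 : c.length = 1 := by exact_mod_cast h1
    obtain ⟨a, ha⟩ := List.length_eq_one_iff.mp hlen1
    have hka : k = a := by have := hself; rw [ha] at this; simpa using this
    have hoa : o = a := by
      have : o ∈ c := (hmem o).mpr ⟨ho, hsub⟩
      rw [ha] at this; simpa using this
    exact hne (hka.trans hoa.symm)
  · intro hmax
    have hall : ∀ o ∈ c, o = k := by
      intro o ho
      obtain ⟨hoks, hsub⟩ := (hmem o).mp ho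
      by_contra hne
      exact hmax o hoks (fun h => hne h.symm) hsub
    have : c = [k] := by
      cases hcc : c with
      | nil => rw [hcc] at hself; cases hself
      | cons a t =>
        have hak : a = k := hall a (by rw [hcc]; simp)
        have ht : t = [] := by
          cases htc : t with
          | nil => rfl
          | cons b t' =>
            exfalso
            have hbk : b = k := hall b (by rw [hcc, htc]; simp)
            have := hknd
            rw [hcc, htc] at this
            simp [hak, hbk] at this
        rw [hak, ht]
    rw [this]; rfl

-- the per-key distinct-combination set (A's inner loop for one group)
def pvG (dg : List (List (String × String))) (k : List String) : PySem.Set (List String) :=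
  dg.foldl (fun s record => PySem.Set.add s (k.map (fun f => (PySem.Dict.ofList record).getD f ""))) PySem.Set.empty

lemma pvG_mem (dg : List (List (String × String))) (k : List String) (t : List String) :
    t ∈ pvG dg k ↔ ∃ r ∈ dg, t = k.map (fun f => (PySem.Dict.ofList r).getD f "") := by
  unfold pvG
  rw [PySem.Set.mem_foldl_add]
  simp [PySem.Set.empty]

-- a fold of adds preserves duplicate-freedom
lemma pvNodup_foldl_add {α β : Type} [BEq α] [LawfulBEq α] (l : List β) (f : β → α) :
    ∀ s : PySem.Set α, s.Nodup → (l.foldl (fun s b => PySem.Set.add s (f b)) s).Nodup := by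
  induction l with
  | nil => intro s hs; exact hs
  | cons b l ih => intro s hs; exact ih _ (PySem.Set.nodup_add _ _ hs)

-- membership in enumerate
lemma pvMem_enumerate {α : Type} (xs : List α) :
    ∀ (s : Int) (b : Int × α),
      (b ∈ PySem.List.enumerate xs s ↔ ∃ i : Nat, ∃ h : i < xs.length, b = (s + i, xs[i])) := by
  induction xs with
  | nil => intro s b; simp [PySem.List.enumerate]
  | cons x xs ih =>
    intro s b
    rw [PySem.List.enumerate]
    simp only [List.mem_cons, ih]
    constructor
    · rintro (rfl | ⟨i, h, rfl⟩)
      · exact ⟨0, by simp, by simp⟩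
      · exact ⟨i + 1, by simpa using h, by simp; omega⟩
    · rintro ⟨i, h, rfl⟩
      cases i with
      | zero => left; simp
      | succ i =>
        right
        refine ⟨i, by simpa using h, ?_⟩
        simp; omega

-- membership in B's single tagged set
lemma pvSeen_mem (dg : List (List (String × String))) (M : List (List String)) :
    ∀ (s0 : PySem.Set (Int × List String)) (x : Int × List String),
      (x ∈ dg.foldl
          (fun seen record =>
            (PySem.List.enumerate M).foldl
              (fun seen ik =>
                PySem.Set.add seen (ik.1, ik.2.map (fun f => (PySem.Dict.ofList record).getD f "")))
              seen)
          s0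
        ↔ x ∈ s0 ∨ ∃ r ∈ dg, ∃ b ∈ PySem.List.enumerate M (0 : Int),
            x = (b.1, b.2.map (fun f => (PySem.Dict.ofList r).getD f ""))) := by
  induction dg with
  | nil => intro s0 x; simp
  | cons r dg ih =>
    intro s0 x
    rw [List.foldl_cons, ih]
    rw [PySem.Set.mem_foldl_add (PySem.List.enumerate M)
      (fun ik => (ik.1, ik.2.map (fun f => (PySem.Dict.ofList r).getD f ""))) s0 x]
    constructor
    · rintro ((h | ⟨b, hb, rfl⟩) | ⟨r', hr', b, hb, rfl⟩)
      · exact Or.inl h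
      · exact Or.inr ⟨r, List.mem_cons_self .., b, hb, rfl⟩
      · exact Or.inr ⟨r', List.mem_cons_of_mem _ hr', b, hb, rfl⟩
    · rintro (h | ⟨r', hr', b, hb, rfl⟩)
      · exact Or.inl (Or.inl h)
      · rcases List.mem_cons.mp hr' with rfl | hmem
        · exact Or.inl (Or.inr ⟨b, hb, rfl⟩)
        · exact Or.inr ⟨r', hmem, b, hb, rfl⟩

-- B's tagged set is duplicate-free
lemma pvSeen_nodup (dg : List (List (String × String))) (M : List (List String)) :
    (dg.foldl
        (fun seen record =>
          (PySem.List.enumerate M).foldl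
            (fun seen ik =>
              PySem.Set.add seen (ik.1, ik.2.map (fun f => (PySem.Dict.ofList record).getD f "")))
            seen)
        PySem.Set.empty).Nodup := by
  suffices h : ∀ (dg : List (List (String × String))) (s : PySem.Set (Int × List String)), s.Nodup →
      (dg.foldl
        (fun seen record =>
          (PySem.List.enumerate M).foldl
            (fun seen ik =>
              PySem.Set.add seen (ik.1, ik.2.map (fun f => (PySem.Dict.ofList record).getD f "")))
            seen)
        s).Nodup by
    exact h dg PySem.Set.empty List.nodup_nil
  intro dg
  induction dg with
  | nil => intro s hs; exact hs
  | cons r dg ih =>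
    intro s hs
    exact ih _ (pvNodup_foldl_add (PySem.List.enumerate M)
      (fun ik => (ik.1, ik.2.map (fun f => (PySem.Dict.ofList r).getD f ""))) s hs)

-- the size of the tagged set is the sum of the per-group distinct counts
lemma pvSeen_len (dg : List (List (String × String))) (M : List (List String)) :
    PySem.Set.len
      (dg.foldl
        (fun seen record =>
          (PySem.List.enumerate M).foldl
            (fun seen ik =>
              PySem.Set.add seen (ik.1, ik.2.map (fun f => (PySem.Dict.ofList record).getD f "")))
            seen)
        PySem.Set.empty)
      = (M.map (fun k => PySem.Set.len (pvG dg k))).sum := by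
  classical
  set seen := dg.foldl
        (fun seen record =>
          (PySem.List.enumerate M).foldl
            (fun seen ik =>
              PySem.Set.add seen (ik.1, ik.2.map (fun f => (PySem.Dict.ofList record).getD f "")))
            seen)
        PySem.Set.empty with hseen
  set n := M.length with hn
  -- membership characterisation of seen
  have hmem : ∀ x : Int × List String,
      x ∈ seen ↔ ∃ i : Nat, ∃ h : i < n, x.1 = (i : Int) ∧ x.2 ∈ pvG dg M[i] := by
    intro x
    rw [hseen, pvSeen_mem dg M PySem.Set.empty x]
    simp only [PySem.Set.empty, List.not_mem_nil, false_or]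
    constructor
    · rintro ⟨r, hr, b, hb, rfl⟩
      obtain ⟨i, h, rfl⟩ := (pvMem_enumerate M 0 b).mp hb
      exact ⟨i, h, by simp, (pvG_mem dg M[i] _).mpr ⟨r, hr, rfl⟩⟩
    · rintro ⟨i, h, hx1, hx2⟩
      obtain ⟨r, hr, hproj⟩ := (pvG_mem dg M[i] x.2).mp hx2
      refine ⟨r, hr, ((i : Int), M[i]), (pvMem_enumerate M 0 _).mpr ⟨i, h, by simp⟩, ?_⟩
      cases x
      simp at hx1 hx2 ⊢
      exact ⟨hx1, hproj⟩
  -- count via Finsets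
  have hnd : seen.Nodup := hseen ▸ pvSeen_nodup dg M
  have hcard : seen.length = (Finset.range n).sum (fun i => (pvG dg (M.getD i [])).length) := by
    have hfin : seen.toFinset
        = (Finset.range n).biUnion
            (fun i => ((pvG dg (M.getD i [])).toFinset).image (fun t => ((i : Int), t))) := by
      ext x
      simp only [List.mem_toFinset, Finset.mem_biUnion, Finset.mem_range, Finset.mem_image,
        hmem x]
      constructor
      · rintro ⟨i, h, hx1, hx2⟩
        refine ⟨i, h, x.2, ?_, ?_⟩
        · rw [List.getD_eq_getElem _ _ h]; simpa using hx2
        · cases x; simp at hx1 ⊢; exact hx1.symm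
      · rintro ⟨i, h, t, ht, rfl⟩
        refine ⟨i, h, rfl, ?_⟩
        rw [List.getD_eq_getElem _ _ h] at ht
        simpa using ht
    have hdisj : ∀ i ∈ Finset.range n, ∀ j ∈ Finset.range n, i ≠ j →
        Disjoint (((pvG dg (M.getD i [])).toFinset).image (fun t => ((i : Int), t)))
                 (((pvG dg (M.getD j [])).toFinset).image (fun t => ((j : Int), t))) := by
      intro i _ j _ hij
      rw [Finset.disjoint_left]
      rintro x hx1 hx2
      simp only [Finset.mem_image] at hx1 hx2
      obtain ⟨t1, _, h1⟩ := hx1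
      obtain ⟨t2, _, h2⟩ := hx2
      apply hij
      have : ((i : Int), t1) = ((j : Int), t2) := h1.trans h2.symm
      have hij2 : (i : Int) = (j : Int) := by simpa using congrArg Prod.fst this
      exact_mod_cast hij2
    rw [← List.toFinset_card_of_nodup hnd, hfin, Finset.card_biUnion hdisj]
    refine Finset.sum_congr rfl (fun i _ => ?_)
    rw [Finset.card_image_of_injective _ (fun a b h => by simpa using h)]
    exact List.toFinset_card_of_nodup (pvNodup_foldl_add dg _ _ List.nodup_nil)
  -- convert to the list sum
  have hmapsum : (M.map (fun k => (pvG dg k).length)).sum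
      = (Finset.range n).sum (fun i => (pvG dg (M.getD i [])).length) := by
    conv_lhs => rw [← List.ofFn_getElem (xs := M)]
    rw [List.map_ofFn, List.sum_ofFn]
    rw [← Fin.sum_univ_eq_sum_range (fun i => (pvG dg (M.getD i [])).length) n]
    refine Finset.sum_congr rfl (fun i _ => ?_)
    simp [Function.comp, List.getD, List.getElem?_eq_getElem i.isLt]
  have hlen : PySem.Set.len seen = (seen.length : Int) := rfl
  rw [hlen, hcard, ← hmapsum]
  have : (M.map (fun k => PySem.Set.len (pvG dg k))) = (M.map (fun k => ((pvG dg k).length : Int))) := rfl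
  rw [this]
  rw [Nat.cast_list_sum, List.map_map]
  rfl

-- every distinct key is a sorted(set(...)) image, hence strictly increasing
lemma pvK_pairwise (fd : List (String × List String)) :
    ∀ k ∈ pvK fd, k.Pairwise (· < ·) := by
  intro k hk
  rw [pvK, PySem.Set.mem_ofList] at hk
  obtain ⟨p, hp, rfl⟩ := List.mem_map.mp hk
  exact PySem.List.sorted_ofList_pairwise_lt p.2

-- maximality over the sorted key list and over the original key list coincide
lemma pvMaxP_congr (fd : List (String × List String)) (k : List String) :
    pvMaxP (pvKS fd) k ↔ pvMaxP (pvK fd) k := by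
  unfold pvMaxP
  constructor
  · intro h o ho; exact h o ((PySem.List.mem_sorted _ _ _ o).mpr ho)
  · intro h o ho; exact h o ((PySem.List.mem_sorted _ _ _ o).mp ho)

-- ===== VERDICT (by name: the statement is the Claim_ definition above) =====
theorem calculate_distinct_required_values_with_merged_fields_cost_py_spec : Claim_equal_calculate_distinct_required_values_with_merged_fields_cost_py := by
  unfold Claim_equal_calculate_distinct_required_values_with_merged_fields_cost_py
  intro fd dg _
  unfold Spec_calculate_distinct_required_values_with_merged_fields_cost_py
  unfold calculate_distinct_required_values_with_merged_fields_cost_py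
    calculate_distinct_required_values_with_merged_fields_cost_py_alt
  -- B's key list is pvK fd
  have hkeys : PySem.List.dedup (((PySem.Dict.ofList fd).values).map pvSortedKey) = pvK fd := by
    simp only [PySem.List.dedup_eq_ofList, PySem.Dict.values, List.map_map, pvK]
    rfl
  rw [hkeys]
  -- A's total is the sum over its groups
  rw [PySem.List.foldl_add (pvGetMergedFieldGroups fd)
    (fun group => PySem.Set.len (dg.foldl
      (fun s record => s.add (group.1.map (fun f => (PySem.Dict.ofList record).getD f "")))
      PySem.Set.empty))
    0]
  rw [zero_add]
  -- and B's total is the sum over its maximal keys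
  rw [pvSeen_len dg (List.filter (fun k => PySem.Set.len (pvCand (pvContaining (pvK fd)) (pvK fd) k) == 1) (pvK fd))]
  -- reduce A's sum to a sum over its maximal-key list
  have hAmap : (pvGetMergedFieldGroups fd).map
      (fun group => PySem.Set.len (dg.foldl
        (fun s record => s.add (group.1.map (fun f => (PySem.Dict.ofList record).getD f "")))
        PySem.Set.empty))
      = (((pvKS fd).filter (pvMaxB (pvKS fd))).map (fun k => PySem.Set.len (pvG dg k))) := by
    rw [← pvGroups_fst, List.map_map]; rfl
  rw [hAmap]
  -- A's maximal-key list is a permutation of B's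
  have hpredA : ∀ k ∈ pvKS fd, pvMaxB (pvKS fd) k
      = (PySem.Set.len (pvCand (pvContaining (pvK fd)) (pvK fd) k) == 1) := by
    intro k hk
    have hkK : k ∈ pvK fd := (PySem.List.mem_sorted _ _ _ k).mp hk
    have h1 := pvMaxB_iff (pvKS fd) k (pvK_pairwise fd k hkK)
      (fun o ho => pvK_pairwise fd o ((PySem.List.mem_sorted _ _ _ o).mp ho))
    have h2 := pvCand_len_iff fd k hkK
    rw [Bool.eq_iff_iff, h1, h2]
    exact pvMaxP_congr fd k
  have hfiltA : (pvKS fd).filter (pvMaxB (pvKS fd))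
      = (pvKS fd).filter (fun k => PySem.Set.len (pvCand (pvContaining (pvK fd)) (pvK fd) k) == 1) :=
    List.filter_congr hpredA
  have hperm : ((pvKS fd).filter (pvMaxB (pvKS fd))).Perm
      ((pvK fd).filter (fun k => PySem.Set.len (pvCand (pvContaining (pvK fd)) (pvK fd) k) == 1)) := by
    rw [hfiltA]
    exact (PySem.List.sorted_perm (pvK fd) (fun k => k.length) true).filter _
  exact List.Perm.sum_eq (hperm.map (fun k => PySem.Set.len (pvG dg k)))
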